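-- pv_equiv track=rewrite | github.com/tpwpfrnl/ProblemSolving | a048.py | check
-- ===== SOURCE A (Python) =====
-- def check(word):
--     dict = {}
--     check = []
--     for i in word:
--         if i not in dict:
--             dict[i] = 1
--         else:
--             value = dict[i]
--             del dict[i]
--             dict[i] = value + 1
--     dict2 = {i:dict[i] for i in dict if dict[i] > 1}
--     for j in dict2:
--         if j*dict[j] not in word:
--             return False
--     return True
-- ===== SOURCE B (Python) =====
-- def check(word):
--     letters = []
--     for c in word:
--         if not letters or letters[-1] != c:
--             letters.append(c)
--     return len(letters) == len(set(letters))
-- ===== Notes on version B (the rewrite author's own statement) =====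
-- stated objective: faster
-- what changed: Instead of counting every character in a dict and then doing a substring search of c*count for each repeated character, B makes one pass collecting the first letter of each maximal run and returns whether those run letters are pairwise distinct.
import Mathlib
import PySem

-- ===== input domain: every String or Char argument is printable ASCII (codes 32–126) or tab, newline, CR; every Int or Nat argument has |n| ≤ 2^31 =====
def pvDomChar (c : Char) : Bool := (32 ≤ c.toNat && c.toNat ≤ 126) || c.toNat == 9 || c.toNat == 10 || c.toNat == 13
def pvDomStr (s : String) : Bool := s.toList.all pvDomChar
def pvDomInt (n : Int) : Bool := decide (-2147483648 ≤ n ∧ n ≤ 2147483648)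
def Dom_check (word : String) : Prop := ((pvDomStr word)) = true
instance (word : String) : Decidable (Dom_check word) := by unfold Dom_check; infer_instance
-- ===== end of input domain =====

-- B replaces A's char-count dict plus per-character substring search by a single pass that
-- keeps one letter per maximal run and tests those letters for distinctness (objective: faster).

-- ===== PORT A =====
-- one iteration of A's counting loop: new char -> 1, else delete and re-insert with value+1
def checkStep (d : PySem.Dict Char Int) (i : Char) : PySem.Dict Char Int :=
  if d.contains i then
    let value := (d.get? i).getD 0   -- dict[i]; the key is present, so getD's default is never used
    (d.erase i).insert i (value + 1)
  else
    d.insert i 1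

def checkChars (w : List Char) : Bool :=
  let d := w.foldl checkStep PySem.Dict.empty
  let dict2 := PySem.Dict.mk (d.items.filter (fun p => decide (1 < p.2)))
  -- 'for j in dict2: if j*dict[j] not in word: return False' / 'return True'
  dict2.items.all (fun p => PySem.Chars.isIn (PySem.List.pyRepeat [p.1] ((d.get? p.1).getD 0)) w)

def check (word : String) : Bool := checkChars word.toList

-- ===== PORT B =====
def check_alt (word : String) : Bool :=
  let letters := word.toList.foldl
    (fun acc c => if acc = [] ∨ PySem.List.pyGet? acc (-1) ≠ some c then acc ++ [c] else acc) []
  letters.length == (PySem.Set.ofList letters).length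

-- ===== PRECONDITION & SPEC =====
def Spec_check (word : String) (out : Bool) : Prop := out = check_alt word
instance (word : String) (out : Bool) : Decidable (Spec_check word out) := by unfold Spec_check; infer_instance

-- ===== CLAIM (what is proved, stated in full; the proofs are below) =====
def Claim_equal_check : Prop := ∀ (word : String), Dom_check word → Spec_check word (check word)

-- ===== LEMMAS AND PROOFS =====

def rhFrom : Char → List Char → List Char
  | _, [] => []
  | c, x :: rest => if x = c then rhFrom c rest else x :: rhFrom x rest
def rh : List Char → List Char
  | [] => []
  | x :: rest => x :: rhFrom x rest

theorem foldB (u : List Char) (acc : List Char) (x : Char) :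
    u.foldl (fun acc c => if acc = [] ∨ PySem.List.pyGet? acc (-1) ≠ some c then acc ++ [c] else acc) (acc ++ [x])
      = (acc ++ [x]) ++ rhFrom x u := by
  induction u generalizing acc x with
  | nil => simp [rhFrom]
  | cons y u' ih =>
    simp only [List.foldl_cons]
    by_cases hyx : y = x
    · subst hyx
      rw [if_neg (by simp)]
      rw [ih, rhFrom, if_pos rfl]
    · rw [if_pos (by simp; exact fun h => hyx h.symm)]
      rw [ih (acc ++ [x]) y, rhFrom, if_neg hyx]
      simp

theorem lettersB (w : List Char) :
    w.foldl (fun acc c => if acc = [] ∨ PySem.List.pyGet? acc (-1) ≠ some c then acc ++ [c] else acc) []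
      = rh w := by
  cases w with
  | nil => rfl
  | cons x t =>
    simp only [List.foldl_cons]
    have := foldB t [] x
    simpa [rh] using this

theorem mem_cons_rhFrom (u : List Char) (c a : Char) : a ∈ c :: rhFrom c u ↔ a ∈ c :: u := by
  induction u generalizing c with
  | nil => simp [rhFrom]
  | cons y u' ih =>
    by_cases hyc : y = c
    · subst hyc
      rw [rhFrom, if_pos rfl]
      rw [ih]
      simp
    · rw [rhFrom, if_neg hyc]
      constructor
      · intro h
        rcases List.mem_cons.mp h with h | h
        · simp [h]
        · have := (ih y).mp h
          simp at this ⊢; tauto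
      · intro h
        rcases List.mem_cons.mp h with h | h
        · simp [h]
        · have := (ih y).mpr (by simpa using h)
          simp at this ⊢; tauto

theorem setlen_iff (l : List Char) : (l.length == (PySem.Set.ofList l).length) = true ↔ l.Nodup := by
  rw [beq_iff_eq]
  constructor
  · intro h
    have hsub : (PySem.Set.ofList l).toFinset = l.toFinset := by
      apply Finset.ext
      intro a
      simp [PySem.Set.mem_ofList]
    have h1 : (PySem.Set.ofList l).length = l.toFinset.card := by
      rw [← hsub, List.toFinset_card_of_nodup (PySem.Set.nodup_ofList l)]
    have h2 : l.toFinset.card = l.dedup.length := List.card_toFinset l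
    have : l.dedup.length = l.length := by omega
    have := (List.Sublist.length_eq (List.dedup_sublist l)).mp this
    exact List.dedup_eq_self.mp this
  · intro h
    have hsub : (PySem.Set.ofList l).toFinset = l.toFinset := by
      apply Finset.ext; intro a; simp [PySem.Set.mem_ofList]
    have h1 : (PySem.Set.ofList l).length = (PySem.Set.ofList l).toFinset.card :=
      (List.toFinset_card_of_nodup (PySem.Set.nodup_ofList l)).symm
    have h2 : l.length = l.toFinset.card := (List.toFinset_card_of_nodup h).symm
    rw [h1, h2, hsub]

theorem checkalt_iff (word : String) : check_alt word = true ↔ (rh word.toList).Nodup := by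
  unfold check_alt
  rw [lettersB, setlen_iff]

theorem replicate_prefix_of_infix (v : List Char) (n : Nat) (x : Char)
    (h : List.replicate n x <:+: v) (hc : v.count x = n) (hh : v.head? = some x) :
    List.replicate n x <+: v := by
  obtain ⟨s, t, hst⟩ := h
  have hcnt : s.count x = 0 := by
    subst hst
    simp [List.count_append] at hc
    omega
  cases s with
  | nil => exact ⟨t, by simpa using hst⟩
  | cons a s' =>
    exfalso
    rw [← hst] at hh
    simp at hh
    subst hh
    simp at hcnt

theorem replicate_infix_cons_iff (m : Nat) (c x : Char) (v : List Char) (hne : c ≠ x) :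
    (List.replicate m c <:+: x :: v) ↔ List.replicate m c <:+: v := by
  constructor
  · intro h
    rcases List.infix_cons_iff.mp h with h | h
    · cases m with
      | zero => exact List.nil_infix
      | succ m' =>
        rw [List.replicate_succ] at h
        exact absurd (List.cons_prefix_cons.mp h).1 hne
    · exact h
  · exact List.infix_cons

theorem replicate_infix_of_succ (n : Nat) (x : Char) (v : List Char)
    (h : List.replicate (n + 1) x <:+: x :: v) : List.replicate n x <:+: v := by
  have hpfx : List.replicate n x <+: List.replicate (n + 1) x :=
    ⟨[x], by rw [← List.replicate_succ']⟩
  rcases List.infix_cons_iff.mp h with h | h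
  · rw [List.replicate_succ] at h
    exact (List.cons_prefix_cons.mp h).2.isInfix
  · exact hpfx.isInfix.trans h

theorem mainAux (u : List Char) (x : Char) :
    (∀ c, List.replicate ((x :: u).count c) c <:+: (x :: u)) ↔ (x :: rhFrom x u).Nodup := by
  induction u generalizing x with
  | nil =>
    simp only [rhFrom, List.nodup_cons, List.not_mem_nil, not_false_iff, List.nodup_nil,
      and_self, iff_true]
    intro c
    by_cases hc : c = x
    · subst hc; simp
    · have hc' : x ≠ c := fun h => hc h.symm
      simp [hc']
  | cons y u' ih =>
    by_cases hyx : y = x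
    · subst hyx
      rw [rhFrom, if_pos rfl, ← ih y]
      constructor
      · intro h c
        by_cases hc : c = y
        · subst hc
          have h2 := h c
          have hcnt : (c :: c :: u').count c = (c :: u').count c + 1 := by
            simp
          rw [hcnt] at h2
          exact replicate_infix_of_succ _ c _ h2
        · have h2 := h c
          have hc' : y ≠ c := fun h => hc h.symm
          have hcnt : (y :: y :: u').count c = (y :: u').count c := by
            simp [hc']
          rw [hcnt] at h2
          exact (replicate_infix_cons_iff _ c y _ hc).mp h2
      · intro h c
        by_cases hc : c = y
        · subst hc
          have h2 := replicate_prefix_of_infix _ _ _ (h c) rfl rfl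
          have : List.replicate ((c :: u').count c + 1) c <+: c :: c :: u' := by
            rw [List.replicate_succ]
            exact List.cons_prefix_cons.mpr ⟨rfl, h2⟩
          have hcnt : (c :: c :: u').count c = (c :: u').count c + 1 := by
            simp
          rw [hcnt]
          exact this.isInfix
        · have h2 := h c
          have hc' : y ≠ c := fun h => hc h.symm
          have hcnt : (y :: y :: u').count c = (y :: u').count c := by
            simp [hc']
          rw [hcnt]
          exact (replicate_infix_cons_iff _ c y _ hc).mpr h2
    · rw [rhFrom, if_neg hyx]
      rw [List.nodup_cons, ← ih y, mem_cons_rhFrom]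
      constructor
      · intro h
        have hxv : x ∉ y :: u' := by
          by_contra hx
          have hpos : 0 < (y :: u').count x := List.count_pos_iff.mpr hx
          obtain ⟨k, hk⟩ := Nat.exists_eq_add_of_lt hpos
          have h2 := replicate_prefix_of_infix _ _ _ (h x) rfl rfl
          have hcnt : (x :: y :: u').count x = (y :: u').count x + 1 := by
            simp
          rw [hcnt] at h2
          obtain ⟨t, ht⟩ := h2
          rw [show (y :: u').count x + 1 = k + 1 + 1 by omega] at ht
          rw [List.replicate_succ, List.replicate_succ] at ht
          simp at ht
          exact hyx ht.1.symm
      -- remaining: Q'(y::u') and converse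
        refine ⟨hxv, ?_⟩
        intro c
        by_cases hc : c = x
        · subst hc
          have : (y :: u').count c = 0 := List.count_eq_zero.mpr hxv
          rw [this]
          exact List.nil_infix
        · have h2 := h c
          have hc' : x ≠ c := fun h => hc h.symm
          have hcnt : (x :: y :: u').count c = (y :: u').count c := by
            simp [hc']
          rw [hcnt] at h2
          exact (replicate_infix_cons_iff _ c x _ hc).mp h2
      · rintro ⟨hxv, hq⟩ c
        by_cases hc : c = x
        · subst hc
          have hcnt : (c :: y :: u').count c = 1 := by
            have : (y :: u').count c = 0 := List.count_eq_zero.mpr hxv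
            simp [this]
          rw [hcnt]
          exact (⟨[], y :: u', by simp⟩ : List.replicate 1 c <:+: c :: y :: u')
        · have hc' : x ≠ c := fun h => hc h.symm
          have hcnt : (x :: y :: u').count c = (y :: u').count c := by
            simp [hc']
          rw [hcnt]
          exact (replicate_infix_cons_iff _ c x _ hc).mpr (hq c)

theorem main_iff (w : List Char) :
    (∀ c, List.replicate (w.count c) c <:+: w) ↔ (rh w).Nodup := by
  cases w with
  | nil => simp [rh]
  | cons x t => exact mainAux t x

def InvA (d : PySem.Dict Char Int) (pfx : List Char) : Prop :=
  d.keys.Nodup ∧ ∀ c, d.get? c = if c ∈ pfx then some ((pfx.count c : Int)) else none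

theorem find?_filter_ne (l : List (Char × Int)) (c i : Char) (hne : c ≠ i) :
    List.find? (fun p => p.1 == c) (l.filter (fun p => !(p.1 == i)))
      = List.find? (fun p => p.1 == c) l := by
  induction l with
  | nil => rfl
  | cons a l ih =>
    by_cases hac : a.1 = c
    · have hai : ¬ a.1 = i := by rw [hac]; exact hne
      simp [hac, hne]
    · by_cases hai : a.1 = i
      · simp [hai, ih, Ne.symm hne]
      · simp [hai, hac, ih]

theorem erase_contains_self (d : PySem.Dict Char Int) (i : Char) :
    (d.erase i).contains i = false := by
  simp only [PySem.Dict.contains, PySem.Dict.erase, List.any_eq_false]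
  intro p hp
  simp only [List.mem_filter] at hp
  simpa using hp.2

theorem erase_insert_get?_self (d : PySem.Dict Char Int) (i : Char) (v : Int) :
    ((d.erase i).insert i v).get? i = some v := by
  rw [PySem.Dict.get?.eq_1, PySem.Dict.items_insert_of_not_contains _ _ (erase_contains_self d i),
    List.find?_append]
  have h1 : List.find? (fun p => p.1 == i) (d.erase i).items = none := by
    apply List.find?_eq_none.mpr
    intro p hp
    simp [PySem.Dict.erase, List.mem_filter] at hp
    simp [hp.2]
  rw [h1]
  simp

theorem erase_insert_get?_ne (d : PySem.Dict Char Int) (i c : Char) (v : Int) (hne : c ≠ i) :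
    ((d.erase i).insert i v).get? c = d.get? c := by
  rw [PySem.Dict.get?.eq_1, PySem.Dict.items_insert_of_not_contains _ _ (erase_contains_self d i),
    List.find?_append]
  have h2 : List.find? (fun p => p.1 == c) [(i, v)] = none := by
    simp [Ne.symm hne]
  rw [h2]
  simp only [Option.or_none]
  rw [show (d.erase i).items = d.items.filter (fun p => !(p.1 == i)) from rfl,
    find?_filter_ne _ _ _ hne]
  rfl

theorem erase_keys_nodup (d : PySem.Dict Char Int) (i : Char) (h : d.keys.Nodup) :
    (d.erase i).keys.Nodup := by
  have : (d.erase i).keys.Sublist d.keys := by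
    rw [show (d.erase i).keys = (d.items.filter (fun p => !(p.1 == i))).map Prod.fst from rfl,
      show d.keys = d.items.map Prod.fst from rfl]
    exact List.Sublist.map _ List.filter_sublist
  exact h.sublist this

theorem inv_step (d : PySem.Dict Char Int) (pfx : List Char) (i : Char)
    (h : InvA d pfx) : InvA (checkStep d i) (pfx ++ [i]) := by
  obtain ⟨hnd, hget⟩ := h
  unfold checkStep
  by_cases hcont : d.contains i = true
  · rw [if_pos hcont]
    have hsome : (d.get? i).isSome := by rw [← PySem.Dict.contains_eq_isSome_get?]; exact hcont
    have hmem : i ∈ pfx := by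
      by_contra hmem
      rw [hget i, if_neg hmem] at hsome
      simp at hsome
    have hval : (d.get? i).getD 0 = (pfx.count i : Int) := by
      rw [hget i, if_pos hmem]; rfl
    constructor
    · exact PySem.Dict.nodup_keys_insert _ _ _ (erase_keys_nodup d i hnd)
    · intro c
      by_cases hc : c = i
      · subst hc
        rw [hval, erase_insert_get?_self]
        have : (pfx ++ [c]).count c = pfx.count c + 1 := by simp
        rw [this, if_pos (by simp)]
        push_cast
        ring_nf
      · rw [hval, erase_insert_get?_ne _ _ _ _ hc, hget c]
        have hcnt : (pfx ++ [i]).count c = pfx.count c := by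
          simp [Ne.symm hc]
        rw [hcnt]
        simp [hc]
  · rw [if_neg hcont]
    have hnone : d.get? i = none := by
      have := PySem.Dict.contains_eq_isSome_get? d i
      rw [Bool.not_eq_true] at hcont
      rw [hcont] at this
      exact Option.not_isSome_iff_eq_none.mp (by rw [← this]; simp)
    have hmem : i ∉ pfx := by
      intro hm
      rw [hget i, if_pos hm] at hnone
      simp at hnone
    constructor
    · exact PySem.Dict.nodup_keys_insert _ _ _ hnd
    · intro c
      by_cases hc : c = i
      · subst hc
        rw [PySem.Dict.get?_insert_self]
        have : (pfx ++ [c]).count c = 1 := by simp [List.count_eq_zero.mpr hmem]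
        rw [this, if_pos (by simp)]
        norm_num
      · rw [PySem.Dict.get?_insert_of_ne _ _ hc, hget c]
        have hcnt : (pfx ++ [i]).count c = pfx.count c := by
          simp [Ne.symm hc]
        rw [hcnt]
        simp [hc]

theorem inv_fold (rest : List Char) (d : PySem.Dict Char Int) (pfx : List Char)
    (h : InvA d pfx) : InvA (rest.foldl checkStep d) (pfx ++ rest) := by
  induction rest generalizing d pfx with
  | nil => simpa using h
  | cons i rest ih =>
    have := ih (checkStep d i) (pfx ++ [i]) (inv_step d pfx i h)
    simpa using this

theorem checkA_iff (w : List Char) :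
    checkChars w = true ↔ ∀ c, List.replicate (w.count c) c <:+: w := by
  have hinv : InvA (w.foldl checkStep PySem.Dict.empty) w := by
    have h0 : InvA PySem.Dict.empty [] := by
      constructor
      · simp [PySem.Dict.keys, PySem.Dict.empty]
      · intro c; simp [PySem.Dict.get?_empty]
    simpa using inv_fold w PySem.Dict.empty [] h0
  obtain ⟨hnd, hget⟩ := hinv
  set d := w.foldl checkStep PySem.Dict.empty with hd
  have hbody : checkChars w = (d.items.filter (fun p => decide (1 < p.2))).all
      (fun p => PySem.Chars.isIn (PySem.List.pyRepeat [p.1] ((d.get? p.1).getD 0)) w) := rfl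
  rw [hbody, List.all_eq_true]
  constructor
  · intro hall c
    by_cases hmem : c ∈ w
    · have hcount : 0 < w.count c := List.count_pos_iff.mpr hmem
      by_cases hbig : 1 < w.count c
      · have hitem : (c, (w.count c : Int)) ∈ d.items := by
          rw [← PySem.Dict.get?_eq_some_iff_mem_items _ _ _ hnd, hget c, if_pos hmem]
        have hfil : (c, (w.count c : Int)) ∈ d.items.filter (fun p => decide (1 < p.2)) := by
          rw [List.mem_filter]
          exact ⟨hitem, by simp; exact_mod_cast hbig⟩
        have := hall _ hfil
        simp only at this
        rw [PySem.List.pyRepeat_singleton] at this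
        have hgd : ((d.get? c).getD 0) = (w.count c : Int) := by rw [hget c, if_pos hmem]; rfl
        rw [hgd] at this
        rw [Int.toNat_natCast] at this
        exact (PySem.Chars.isIn_iff_infix _ _).mp this
      · have h1 : w.count c = 1 := by omega
        rw [h1]
        exact (List.singleton_infix_iff c w).mpr hmem
    · rw [List.count_eq_zero.mpr hmem]
      exact List.nil_infix
  · intro hrep p hp
    rw [List.mem_filter] at hp
    obtain ⟨hpi, hpb⟩ := hp
    have hsome : d.get? p.1 = some p.2 := PySem.Dict.get?_of_mem_items _ hpi hnd
    have hmem : p.1 ∈ w := by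
      by_contra hm
      rw [hget p.1, if_neg hm] at hsome
      simp at hsome
    have hval : p.2 = (w.count p.1 : Int) := by
      rw [hget p.1, if_pos hmem] at hsome
      simpa using hsome.symm
    rw [PySem.List.pyRepeat_singleton]
    have hgd : ((d.get? p.1).getD 0) = (w.count p.1 : Int) := by rw [hget p.1, if_pos hmem]; rfl
    rw [hgd, Int.toNat_natCast]
    exact (PySem.Chars.isIn_iff_infix _ _).mpr (hrep p.1)

-- ===== VERDICT (by name: the statement is the Claim_ definition above) =====
theorem check_spec : Claim_equal_check := by
  intro word _
  unfold Spec_check check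
  rw [Bool.eq_iff_iff, checkA_iff, checkalt_iff, main_iff]
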